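-- pv_equiv track=rewrite | github.com/johnsonaaj/hello.py | solve_puzzle.py | solve_puzzle1
-- ===== SOURCE A (Python) =====
-- def solve_puzzle1(title_L, index_v, m_list):
--       if index_v == len(title_L) -1:
--            return True
--       elif index_v in m_list:
--            return False
--       m_list.append(index_v)
--       clock_index =(index_v + title_L[index_v]) % len(title_L)
--       count_index =(index_v - title_L[index_v]) % len(title_L)
--       if solve_puzzle1(title_L, clock_index, m_list):
--        return True
--       m_list.remove(index_v)
--       return False
-- ===== SOURCE B (Python) =====
-- def solve_puzzle1(title_L, index_v, m_list):
--     pushed = []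
--     current = index_v
--     while True:
--         if current == len(title_L) - 1:
--             m_list.extend(pushed)
--             return True
--         if current in m_list or current in pushed:
--             return False
--         pushed.append(current)
--         current = (current + title_L[current]) % len(title_L)
-- ===== Notes on version B (the rewrite author's own statement) =====
-- stated objective: simpler
-- what changed: The recursion with append-then-backtrack-remove on m_list is replaced by an iterative pointer loop that accumulates the visited indices in a local list and merges them into m_list only on success (and drops the unused count_index).
import Mathlib
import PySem

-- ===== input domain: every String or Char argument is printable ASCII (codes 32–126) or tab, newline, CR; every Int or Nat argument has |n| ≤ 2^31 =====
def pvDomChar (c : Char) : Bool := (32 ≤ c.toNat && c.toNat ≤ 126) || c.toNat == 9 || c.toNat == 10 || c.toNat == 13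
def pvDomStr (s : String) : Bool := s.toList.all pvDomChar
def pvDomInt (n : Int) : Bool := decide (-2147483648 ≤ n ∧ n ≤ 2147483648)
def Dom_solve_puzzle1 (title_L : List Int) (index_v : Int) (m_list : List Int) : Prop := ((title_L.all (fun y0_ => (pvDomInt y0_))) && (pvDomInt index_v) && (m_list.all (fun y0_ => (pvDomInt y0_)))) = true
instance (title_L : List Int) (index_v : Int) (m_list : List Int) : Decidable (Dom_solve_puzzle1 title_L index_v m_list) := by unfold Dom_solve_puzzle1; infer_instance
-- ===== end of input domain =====

-- B replaces A's append/backtrack-remove recursion by an iterative pointer loop with a local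
-- visited list, merged into m_list only on success (objective: simpler); A and B perform the
-- same net in-place mutation of m_list, and the theorem below is about the return value.

-- ===== PORT A =====
-- Recursion returns (result, final contents of the mutated m_list); fuel title_L.length + 2
-- strictly bounds the recursion depth (each call appends a fresh index, at most len+1 appends),
-- so the fuel-0 branch is never reached on inputs satisfying Pre_.
def solveA (title_L : List Int) : Nat → Int → List Int → Bool × List Int
  | 0, _, m_list => (false, m_list)
  | n+1, index_v, m_list =>
    if index_v = (title_L.length : Int) - 1 then (true, m_list)
    else if index_v ∈ m_list then (false, m_list)
    else
      let m1 := m_list ++ [index_v]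
      let clock_index := PySem.Int.mod (index_v + ((PySem.List.pyGet? title_L index_v).getD 0)) (title_L.length : Int)
      let _count_index := PySem.Int.mod (index_v - ((PySem.List.pyGet? title_L index_v).getD 0)) (title_L.length : Int)
      let r := solveA title_L n clock_index m1
      if r.1 then (true, r.2) else (false, r.2.erase index_v)

def solve_puzzle1 (title_L : List Int) (index_v : Int) (m_list : List Int) : Bool :=
  (solveA title_L (title_L.length + 2) index_v m_list).1

-- ===== PORT B =====
-- Iterative loop: (result, final local pushed list); same fuel bound as A's depth.
def loopB (title_L : List Int) : Nat → Int → List Int → List Int → Bool × List Int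
  | 0, _, _, pushed => (false, pushed)
  | n+1, current, m_list, pushed =>
    if current = (title_L.length : Int) - 1 then (true, pushed)
    else if current ∈ m_list ∨ current ∈ pushed then (false, pushed)
    else loopB title_L n (PySem.Int.mod (current + ((PySem.List.pyGet? title_L current).getD 0)) (title_L.length : Int)) m_list (pushed ++ [current])

def solve_puzzle1_alt (title_L : List Int) (index_v : Int) (m_list : List Int) : Bool :=
  (loopB title_L (title_L.length + 2) index_v m_list []).1

-- ===== PRECONDITION & SPEC =====
-- Pre_ excludes exactly the inputs where Python A raises IndexError at title_L[index_v]
-- (title_L empty, or initial index_v outside [-len, len), with neither early return firing).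
def Pre_solve_puzzle1 (title_L : List Int) (index_v : Int) (m_list : List Int) : Prop :=
  index_v = (title_L.length : Int) - 1 ∨ index_v ∈ m_list ∨
    (title_L ≠ [] ∧ -(title_L.length : Int) ≤ index_v ∧ index_v < (title_L.length : Int))
instance (title_L : List Int) (index_v : Int) (m_list : List Int) : Decidable (Pre_solve_puzzle1 title_L index_v m_list) := by unfold Pre_solve_puzzle1; infer_instance
def pvWitness_solve_puzzle1 : List Int × Int × List Int := ([1, 1, 1], 0, [])

def Spec_solve_puzzle1 (title_L : List Int) (index_v : Int) (m_list : List Int) (out : Bool) : Prop := out = solve_puzzle1_alt title_L index_v m_list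
instance (title_L : List Int) (index_v : Int) (m_list : List Int) (out : Bool) : Decidable (Spec_solve_puzzle1 title_L index_v m_list out) := by unfold Spec_solve_puzzle1; infer_instance

-- ===== CLAIM (what is proved, stated in full; the proofs are below) =====
def Claim_equal_solve_puzzle1 : Prop := ∀ (title_L : List Int) (index_v : Int) (m_list : List Int), Dom_solve_puzzle1 title_L index_v m_list → Pre_solve_puzzle1 title_L index_v m_list → Spec_solve_puzzle1 title_L index_v m_list (solve_puzzle1 title_L index_v m_list)

-- ===== LEMMAS AND PROOFS =====
-- The first components agree for every fuel, when A's list is split as m_list ++ pushed.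
theorem loopB_eq_solveA (title_L : List Int) : ∀ (n : Nat) (cur : Int) (m pushed : List Int),
    (loopB title_L n cur m pushed).1 = (solveA title_L n cur (m ++ pushed)).1 := by
  intro n
  induction n with
  | zero => intro cur m pushed; rfl
  | succ n ih =>
    intro cur m pushed
    simp only [loopB, solveA, List.mem_append]
    by_cases h1 : cur = (title_L.length : Int) - 1
    · simp [h1]
    · by_cases h2 : cur ∈ m ∨ cur ∈ pushed
      · simp [h1, h2]
      · simp only [h1, h2, if_false]
        rw [ih]
        rw [List.append_assoc]
        cases hr : (solveA title_L n
            (PySem.Int.mod (cur + ((PySem.List.pyGet? title_L cur).getD 0)) (title_L.length : Int))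
            (m ++ (pushed ++ [cur]))).1 <;> simp

theorem solve_puzzle1_spec' (title_L : List Int) (index_v : Int) (m_list : List Int) :
    solve_puzzle1 title_L index_v m_list = solve_puzzle1_alt title_L index_v m_list := by
  unfold solve_puzzle1 solve_puzzle1_alt
  rw [loopB_eq_solveA, List.append_nil]

-- ===== VERDICT (by name: the statement is the Claim_ definition above) =====
theorem solve_puzzle1_spec : Claim_equal_solve_puzzle1 := by
  intro title_L index_v m_list _ _
  exact (solve_puzzle1_spec' title_L index_v m_list)
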